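-- pv_equiv track=rewrite | github.com/debbieuri/pictologic_try | pictologic.py | set_heightways
-- ===== SOURCE A (Python) =====
-- def set_heightways(level,r):
--     numbers = []
--     for a in range(len(level)):
--         numbers.append([])
--         temp = 0
--         for b in level[a]:
--             if b == True:
--                 temp+=1
--             else:
--                 if temp != 0:
--                     numbers[a].append(temp)
--                 temp = 0
--         if temp != 0:
--             numbers[a].append(temp)
--         if numbers[a] == []:
--             numbers[a].append(temp)
--     if r:
--         for i in numbers:
--             i.reverse()
--     return numbers
-- ===== SOURCE B (Python) =====
-- def set_heightways(level, r):
--     numbers = []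
--     for row in level:
--         n = len(row)
--         starts = [i for i in range(n) if row[i] and (i == 0 or not row[i - 1])]
--         ends = [i + 1 for i in range(n) if row[i] and (i == n - 1 or not row[i + 1])]
--         runs = [e - s for s, e in zip(starts, ends)]
--         if not runs:
--             runs = [0]
--         numbers.append(runs[::-1] if r else runs)
--     return numbers
-- ===== Notes on version B (the rewrite author's own statement) =====
-- stated objective: alternative
-- what changed: Replaces A's stateful counter/reset single pass with boundary detection: two index comprehensions locate run starts (True whose predecessor is absent/False) and run ends (True whose successor is absent/False), and run lengths are end-start differences over zip(starts, ends).
import Mathlib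
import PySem

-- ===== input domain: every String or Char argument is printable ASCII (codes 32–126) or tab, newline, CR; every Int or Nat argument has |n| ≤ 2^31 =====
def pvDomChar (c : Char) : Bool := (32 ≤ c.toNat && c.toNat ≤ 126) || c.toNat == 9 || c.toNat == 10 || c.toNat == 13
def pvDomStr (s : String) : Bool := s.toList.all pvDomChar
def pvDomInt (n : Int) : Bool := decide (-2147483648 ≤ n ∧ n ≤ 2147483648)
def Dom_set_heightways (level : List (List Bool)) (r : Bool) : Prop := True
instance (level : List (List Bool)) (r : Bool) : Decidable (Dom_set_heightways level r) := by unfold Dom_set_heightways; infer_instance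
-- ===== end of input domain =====

-- B replaces A's stateful counter/reset pass by boundary detection: index comprehensions for run starts and run ends, run lengths as end-start differences; alternative decomposition, same cost.

-- ===== PORT A =====
def set_heightways (level : List (List Bool)) (r : Bool) : List (List Int) :=
  let numbers := level.foldl (fun numbers row =>
    let st := row.foldl (fun (st : List Int × Int) b =>
      if b == true then (st.1, st.2 + 1)
      else (if st.2 ≠ 0 then st.1 ++ [st.2] else st.1, 0)) ([], 0)
    let nums := if st.2 ≠ 0 then st.1 ++ [st.2] else st.1
    let nums := if nums = [] then nums ++ [st.2] else nums
    numbers ++ [nums]) []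
  if r then numbers.map List.reverse else numbers

-- ===== PORT B =====
-- row[i], row[i-1], row[i+1] are accessed only at indices the comprehension guards keep in
-- range (0 ≤ i < n, i-1 only when i ≠ 0, i+1 only when i ≠ n-1), so `getD` is exact there.
def set_heightways_alt (level : List (List Bool)) (r : Bool) : List (List Int) :=
  level.foldl (fun numbers row =>
    let n := row.length
    let starts := (List.range n).filter (fun i => row.getD i false && ((i == 0) || !(row.getD (i-1) false)))
    let ends := ((List.range n).filter (fun i => row.getD i false && ((i == n-1) || !(row.getD (i+1) false)))).map (· + 1)
    let runs := List.zipWith (fun (s e : Nat) => (e : Int) - (s : Int)) starts ends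
    let runs := if runs = [] then [0] else runs
    numbers ++ [if r then runs.reverse else runs]) []

-- ===== PRECONDITION & SPEC =====
def Spec_set_heightways (level : List (List Bool)) (r : Bool) (out : List (List Int)) : Prop := out = set_heightways_alt level r
instance (level : List (List Bool)) (r : Bool) (out : List (List Int)) : Decidable (Spec_set_heightways level r out) := by unfold Spec_set_heightways; infer_instance

-- ===== CLAIM (what is proved, stated in full; the proofs are below) =====
def Claim_equal_set_heightways : Prop := ∀ (level : List (List Bool)) (r : Bool), Dom_set_heightways level r → Spec_set_heightways level r (set_heightways level r)

-- ===== LEMMAS AND PROOFS =====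

/-- Run lengths of maximal runs of `true`, with an open run of length `temp` pending. -/
def runsAux (temp : Int) : List Bool → List Int
  | [] => if temp ≠ 0 then [temp] else []
  | b :: t => if b then runsAux (temp + 1) t else (if temp ≠ 0 then [temp] else []) ++ runsAux 0 t

def rowRes (row : List Bool) : List Int :=
  if runsAux 0 row = [] then [0] else runsAux 0 row

theorem A_row : ∀ (row : List Bool) (acc : List Int) (temp : Int),
    (let st := row.foldl (fun (st : List Int × Int) b =>
        if b == true then (st.1, st.2 + 1)
        else (if st.2 ≠ 0 then st.1 ++ [st.2] else st.1, 0)) (acc, temp);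
     if st.2 ≠ 0 then st.1 ++ [st.2] else st.1) = acc ++ runsAux temp row := by
  intro row
  induction row with
  | nil => intro acc temp; simp only [List.foldl, runsAux]; split_ifs <;> simp
  | cons b t ih =>
    intro acc temp
    cases b with
    | true => simpa [runsAux] using ih acc (temp + 1)
    | false =>
      have hfe : ((false == true)) = false := rfl
      simp only [List.foldl, hfe, if_false, runsAux, Bool.false_eq_true]
      rw [ih]
      split_ifs <;> simp

theorem A_rowRes (row : List Bool) :
    (let st := row.foldl (fun (st : List Int × Int) b =>
        if b == true then (st.1, st.2 + 1)
        else (if st.2 ≠ 0 then st.1 ++ [st.2] else st.1, 0)) ([], 0)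
     let nums := if st.2 ≠ 0 then st.1 ++ [st.2] else st.1
     if nums = [] then nums ++ [st.2] else nums) = rowRes row := by
  have h := A_row row [] 0
  simp only [List.nil_append] at h
  simp only [rowRes]
  by_cases h2 : (row.foldl (fun (st : List Int × Int) b =>
        if b == true then (st.1, st.2 + 1)
        else (if st.2 ≠ 0 then st.1 ++ [st.2] else st.1, 0)) ([], 0)).2 = 0
  · simp only [h2, ne_eq, not_true_eq_false, if_false] at h ⊢
    rw [h]
    split_ifs with hr <;> simp [hr]
  · simp only [ne_eq, h2, not_false_eq_true, if_true] at h ⊢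
    have hne : runsAux 0 row ≠ [] := by rw [← h]; simp
    rw [h]
    simp [hne]

/-- Recursive characterisation of B's `starts` comprehension: indices (relative to the current
    suffix) of `true` elements whose predecessor is `prev` (before the suffix) resp. the previous
    element, and is not `true`. -/
def startsF (prev : Bool) : List Bool → List Nat
  | [] => []
  | b :: t => (if b && !prev then [0] else []) ++ (startsF b t).map (· + 1)

/-- Recursive characterisation of B's `ends` comprehension: `i+1` for `true` elements whose
    successor is absent or `false`. -/
def endsF : List Bool → List Nat
  | [] => []
  | b :: t => (if b && !(t.headD false) then [1] else []) ++ (endsF t).map (· + 1)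

theorem startsF_indep (t : List Bool) (h : t.headD false = false) :
    startsF true t = startsF false t := by
  cases t with
  | nil => rfl
  | cons c t' => simp only [List.headD_cons] at h; subst h; simp [startsF]

theorem starts_filter : ∀ (row : List Bool) (prev : Bool),
    (List.range row.length).filter
      (fun i => row.getD i false && (if i = 0 then !prev else !(row.getD (i-1) false)))
      = startsF prev row := by
  intro row
  induction row with
  | nil => intro prev; simp [startsF]
  | cons b t ih =>
    intro prev
    rw [List.length_cons, List.range_succ_eq_map, List.filter_cons, List.filter_map]
    simp only [List.getD_cons_zero]
    have hcomp : (fun i => (b :: t).getD i false &&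
        (if i = 0 then !prev else !((b :: t).getD (i-1) false))) ∘ Nat.succ
        = fun j => t.getD j false && (if j = 0 then !b else !(t.getD (j-1) false)) := by
      funext j
      cases j with
      | zero => simp
      | succ j' => simp
    rw [hcomp, ih b]
    cases b <;> cases prev <;> simp [startsF]

theorem ends_filter : ∀ (row : List Bool),
    ((List.range row.length).filter
      (fun i => row.getD i false && ((i == row.length - 1) || !(row.getD (i+1) false)))).map (· + 1)
      = endsF row := by
  intro row
  induction row with
  | nil => simp [endsF]
  | cons b t ih =>
    rw [List.length_cons, List.range_succ_eq_map, List.filter_cons]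
    have h0 : ((b :: t).getD 0 false && ((0 == t.length + 1 - 1) || !((b :: t).getD 1 false)))
        = (b && !(t.headD false)) := by
      cases t with
      | nil => cases b <;> rfl
      | cons c t' => cases b <;> cases c <;> simp
    rw [h0]
    have hcong : (List.range t.length).filter ((fun i => (b :: t).getD i false &&
          ((i == t.length + 1 - 1) || !((b :: t).getD (i+1) false))) ∘ Nat.succ)
        = (List.range t.length).filter
            (fun j => t.getD j false && ((j == t.length - 1) || !(t.getD (j+1) false))) := by
      apply List.filter_congr
      intro j hj
      have hjl : j < t.length := List.mem_range.mp hj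
      have hbe : ((j + 1 == t.length + 1 - 1)) = (j == t.length - 1) := by
        simp only [Nat.add_sub_cancel]
        cases hq : (j + 1 == t.length)
        · simp only [beq_eq_false_iff_ne, ne_eq] at hq
          have : ¬ (j = t.length - 1) := by omega
          simp [this]
        · have : j + 1 = t.length := by simpa using hq
          have : j = t.length - 1 := by omega
          simp [this]
      simp only [Function.comp, List.getD_cons_succ, hbe]
    rw [List.filter_map, hcong]
    by_cases hb : (b && !(t.headD false)) = true
    · rw [if_pos hb]
      simp only [List.map_cons, List.map_map, endsF, hb]
      rw [← ih]
      simp [List.map_map, Function.comp_def, Nat.succ_eq_add_one]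
    · rw [if_neg (by simpa using hb)]
      simp only [endsF, hb]
      rw [← ih]
      simp [List.map_map, Function.comp_def, Nat.succ_eq_add_one]

theorem zip_shift (k : Nat) : ∀ (a b : List Nat),
    List.zipWith (fun (s e : Nat) => (e : Int) - (s : Int)) (a.map (· + k)) (b.map (· + k))
      = List.zipWith (fun (s e : Nat) => (e : Int) - (s : Int)) a b := by
  intro a
  induction a with
  | nil => intro b; simp
  | cons x xs ih =>
    intro b
    cases b with
    | nil => simp
    | cons y ys =>
      simp only [List.map_cons, List.zipWith_cons_cons, ih]
      congr 1
      push_cast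
      ring

theorem startsF_true_repl : ∀ (k : Nat) (rest : List Bool),
    startsF true (List.replicate k true ++ rest) = (startsF true rest).map (· + k) := by
  intro k
  induction k with
  | zero => intro rest; simp
  | succ k' ih =>
    intro rest
    rw [List.replicate_succ, List.cons_append]
    simp only [startsF, Bool.not_true, Bool.and_false, Bool.false_eq_true, if_false,
      List.nil_append]
    rw [ih, List.map_map]
    congr 1

theorem endsF_repl : ∀ (k : Nat) (rest : List Bool), 0 < k → rest.headD false = false →
    endsF (List.replicate k true ++ rest) = k :: (endsF rest).map (· + k) := by
  intro k
  induction k with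
  | zero => intro rest h; omega
  | succ k' ih =>
    intro rest _ hrest
    rw [List.replicate_succ, List.cons_append]
    by_cases hk : k' = 0
    · subst hk
      simp only [List.replicate_zero, List.nil_append]
      cases rest with
      | nil => simp [endsF]
      | cons c cs =>
        simp only [List.headD_cons] at hrest
        subst hrest
        simp [endsF]
    · have hk' : 0 < k' := Nat.pos_of_ne_zero hk
      have hhead : (List.replicate k' true ++ rest).headD false = true := by
        cases k' with
        | zero => omega
        | succ m => rw [List.replicate_succ, List.cons_append]; rfl
      simp only [endsF, hhead, Bool.not_true, Bool.and_false, Bool.false_eq_true, if_false,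
        List.nil_append]
      rw [ih rest hk' hrest, List.map_cons, List.map_map]
      congr 1

theorem startsF_false_repl (k : Nat) (rest : List Bool) (hk : 0 < k)
    (hrest : rest.headD false = false) :
    startsF false (List.replicate k true ++ rest) = 0 :: (startsF false rest).map (· + k) := by
  cases k with
  | zero => omega
  | succ k' =>
    rw [List.replicate_succ, List.cons_append]
    simp only [startsF, Bool.not_false, Bool.and_true]
    rw [startsF_true_repl, startsF_indep rest hrest, List.map_map]
    congr 1

theorem runsAux_repl : ∀ (k : Nat) (rest : List Bool) (c : Int),
    runsAux c (List.replicate k true ++ rest) = runsAux (c + k) rest := by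
  intro k
  induction k with
  | zero => intro rest c; simp
  | succ k' ih =>
    intro rest c
    rw [List.replicate_succ, List.cons_append]
    simp only [runsAux, ih]
    push_cast
    ring

theorem dropWhile_headD_false : ∀ (l : List Bool), ((l.dropWhile id).headD false) = false := by
  intro l
  induction l with
  | nil => rfl
  | cons b t ih =>
    cases b with
    | true => simpa [List.dropWhile] using ih
    | false => simp [List.dropWhile]

theorem zip_eq_runs : ∀ (n : Nat) (t : List Bool), t.length = n →
    List.zipWith (fun (s e : Nat) => (e : Int) - (s : Int)) (startsF false t) (endsF t)
      = runsAux 0 t := by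
  intro n
  induction n using Nat.strong_induction_on with
  | _ n ih =>
    intro t hlen
    cases t with
    | nil => simp [startsF, endsF, runsAux]
    | cons b t' =>
      cases b with
      | false =>
        have h1 : startsF false (false :: t') = (startsF false t').map (· + 1) := by
          simp [startsF]
        have h2 : endsF (false :: t') = (endsF t').map (· + 1) := by
          simp [endsF]
        rw [h1, h2, zip_shift 1]
        have h3 : runsAux 0 (false :: t') = runsAux 0 t' := by simp [runsAux]
        have hl : t'.length + 1 = n := by simpa using hlen
        rw [h3, ih t'.length (by omega) t' rfl]
      | true =>
        -- decompose the leading block of `true`s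
        obtain ⟨K, rest, hKpos, hrhead, hdecomp, hlensum⟩ :
            ∃ K rest, 0 < K ∧ rest.headD false = false ∧
              (true :: t') = List.replicate K true ++ rest ∧
              K + rest.length = t'.length + 1 := by
          refine ⟨((true :: t').takeWhile id).length, (true :: t').dropWhile id, ?_, ?_, ?_, ?_⟩
          · simp [List.takeWhile]
          · exact dropWhile_headD_false (true :: t')
          · conv_lhs => rw [← List.takeWhile_append_dropWhile (p := id) (l := true :: t')]
            congr 1
            apply List.eq_replicate_of_mem
            intro x hx
            simpa using List.mem_takeWhile_imp hx
          · have h := congrArg List.length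
              (List.takeWhile_append_dropWhile (p := id) (l := true :: t'))
            rw [List.length_append] at h
            rw [h]
            simp
        have hlen' : t'.length + 1 = n := by simpa using hlen
        have hlenlt : rest.length < n := by omega
        rw [hdecomp, startsF_false_repl K rest hKpos hrhead, endsF_repl K rest hKpos hrhead]
        rw [List.zipWith_cons_cons, zip_shift K, ih rest.length hlenlt rest rfl]
        rw [runsAux_repl]
        have hK0 : K ≠ 0 := by omega
        have hKne : (0 : Int) + (K : Int) ≠ 0 := by
          have : (0:Int) < K := by exact_mod_cast hKpos
          omega
        cases rest with
        | nil => simp [runsAux, hK0]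
        | cons c cs =>
          simp only [List.headD_cons] at hrhead
          subst hrhead
          simp [runsAux, hK0]

/-- B's per-row computation equals `rowRes`. -/
theorem B_row (row : List Bool) :
    (let n := row.length
     let starts := (List.range n).filter (fun i => row.getD i false && ((i == 0) || !(row.getD (i-1) false)))
     let ends := ((List.range n).filter (fun i => row.getD i false && ((i == n-1) || !(row.getD (i+1) false)))).map (· + 1)
     let runs := List.zipWith (fun (s e : Nat) => (e : Int) - (s : Int)) starts ends
     if runs = [] then [0] else runs) = rowRes row := by
  have hs : (List.range row.length).filter
      (fun i => row.getD i false && ((i == 0) || !(row.getD (i-1) false))) = startsF false row := by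
    rw [← starts_filter row false]
    apply List.filter_congr
    intro i _
    cases i <;> simp
  simp only [hs, ends_filter row, zip_eq_runs row.length row rfl, rowRes]

theorem foldA : ∀ (level : List (List Bool)) (init : List (List Int)),
    level.foldl (fun numbers row =>
      let st := row.foldl (fun (st : List Int × Int) b =>
        if b == true then (st.1, st.2 + 1)
        else (if st.2 ≠ 0 then st.1 ++ [st.2] else st.1, 0)) ([], 0)
      let nums := if st.2 ≠ 0 then st.1 ++ [st.2] else st.1
      let nums := if nums = [] then nums ++ [st.2] else nums
      numbers ++ [nums]) init = init ++ level.map rowRes := by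
  intro level
  induction level with
  | nil => intro init; simp
  | cons h t ih =>
    intro init
    rw [List.foldl_cons, ih]
    have hb := A_rowRes h
    simp only [] at hb ⊢
    rw [hb]
    simp

theorem foldB (r : Bool) : ∀ (level : List (List Bool)) (init : List (List Int)),
    level.foldl (fun numbers row =>
      let n := row.length
      let starts := (List.range n).filter (fun i => row.getD i false && ((i == 0) || !(row.getD (i-1) false)))
      let ends := ((List.range n).filter (fun i => row.getD i false && ((i == n-1) || !(row.getD (i+1) false)))).map (· + 1)
      let runs := List.zipWith (fun (s e : Nat) => (e : Int) - (s : Int)) starts ends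
      let runs := if runs = [] then [0] else runs
      numbers ++ [if r then runs.reverse else runs]) init
    = init ++ level.map (fun row => if r then (rowRes row).reverse else rowRes row) := by
  intro level
  induction level with
  | nil => intro init; simp
  | cons h t ih =>
    intro init
    rw [List.foldl_cons, ih]
    have hb := B_row h
    simp only [] at hb ⊢
    rw [hb]
    simp

-- ===== VERDICT (by name: the statement is the Claim_ definition above) =====
theorem set_heightways_spec : Claim_equal_set_heightways := by
  unfold Claim_equal_set_heightways
  intro level r _
  unfold Spec_set_heightways set_heightways set_heightways_alt
  rw [foldA, foldB]
  cases r <;> simp [List.map_map]
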